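-- pv_equiv track=rewrite | github.com/olzlgur/Programmers-codingtest-practice | Lv.2/dictionary.py | solution
-- ===== SOURCE A (Python) =====
-- def solution(word):
--     answer = 0
--     dic = {'A' : 0, 'E' : 1, 'I' : 2, 'O' : 3, 'U' : 4}
--
--     for index, c in enumerate(word) :
--         for i in range(dic[c]) :
--             answer += cal(4-index)
--         answer += dic[c] + 1
--
--     return answer
--
-- def cal(n):
--     return sum(5**i for i in range(1,n+1))
-- ===== SOURCE B (Python) =====
-- def solution(word):
--     dic = {'A': 0, 'E': 1, 'I': 2, 'O': 3, 'U': 4}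
--     answer = 0
--     for index, c in enumerate(word):
--         weight = (5 ** (5 - index) - 5) // 4 + 1 if index < 4 else 1
--         answer += dic[c] * weight + 1
--     return answer
-- ===== Notes on version B (the rewrite author's own statement) =====
-- stated objective: simpler
-- what changed: Replaces the inner range(dic[c]) loop and the cal helper (itself a sum loop) by a closed-form place-value weight (5**(5-index)-5)//4+1, accumulated in a single pass.
import Mathlib
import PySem

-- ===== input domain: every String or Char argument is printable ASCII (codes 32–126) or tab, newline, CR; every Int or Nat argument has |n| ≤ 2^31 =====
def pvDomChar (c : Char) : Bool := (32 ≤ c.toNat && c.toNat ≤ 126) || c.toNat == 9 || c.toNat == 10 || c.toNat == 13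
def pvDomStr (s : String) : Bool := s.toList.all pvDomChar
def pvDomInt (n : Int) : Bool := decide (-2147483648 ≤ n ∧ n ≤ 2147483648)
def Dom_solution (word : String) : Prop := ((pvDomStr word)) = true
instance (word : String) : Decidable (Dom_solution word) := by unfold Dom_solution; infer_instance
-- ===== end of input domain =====

-- B replaces A's inner range(dic[c]) loop and the cal helper by a closed-form place-value weight, one pass (objective: simpler).

-- ===== PORT A =====
def pvCal (n : Int) : Int :=
  ((PySem.List.pyRange 1 (n + 1) 1).map (fun i => (5 : Int) ^ i.toNat)).sum

def pvDicA : PySem.Dict Char Int :=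
  (((((PySem.Dict.empty).insert 'A' 0).insert 'E' 1).insert 'I' 2).insert 'O' 3).insert 'U' 4

def solution (word : String) : Int :=
  (PySem.List.enumerate word.toList 0).foldl
    (fun answer p =>
      let d := pvDicA.getD p.2 0
      let answer := (PySem.List.pyRange 0 d 1).foldl (fun a _ => a + pvCal (4 - p.1)) answer
      answer + d + 1) 0

-- ===== PORT B =====
def pvDicB : PySem.Dict Char Int :=
  (((((PySem.Dict.empty).insert 'A' 0).insert 'E' 1).insert 'I' 2).insert 'O' 3).insert 'U' 4

def solution_alt (word : String) : Int :=
  (PySem.List.enumerate word.toList 0).foldl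
    (fun answer p =>
      let weight : Int :=
        if p.1 < 4 then PySem.Int.floordiv ((5 : Int) ^ (5 - p.1).toNat - 5) 4 + 1 else 1
      answer + pvDicB.getD p.2 0 * weight + 1) 0

-- ===== PRECONDITION & SPEC =====
-- Pre_ excludes words containing a non-vowel character, on which Python A raises KeyError.
def Pre_solution (word : String) : Prop :=
  word.toList.all (fun c => c = 'A' || c = 'E' || c = 'I' || c = 'O' || c = 'U') = true
instance (word : String) : Decidable (Pre_solution word) := by unfold Pre_solution; infer_instance
def pvWitness_solution : String := "AEU"

def Spec_solution (word : String) (out : Int) : Prop := out = solution_alt word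
instance (word : String) (out : Int) : Decidable (Spec_solution word out) := by unfold Spec_solution; infer_instance

-- ===== CLAIM (what is proved, stated in full; the proofs are below) =====
def Claim_equal_solution : Prop := ∀ (word : String), Dom_solution word → Pre_solution word → Spec_solution word (solution word)

-- ===== LEMMAS AND PROOFS =====

lemma pv_foldl_add_const {α : Type} (l : List α) (a t : Int) :
    l.foldl (fun x _ => x + t) a = a + l.length * t := by
  induction l generalizing a with
  | nil => simp
  | cons x xs ih => simp [List.foldl, ih]; ring

-- the closed-form weight equals cal(4-i)+1 for every index i ≥ 0
lemma pv_weight_eq (i : Int) (hi : 0 ≤ i) :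
    (if i < 4 then PySem.Int.floordiv ((5 : Int) ^ (5 - i).toNat - 5) 4 + 1 else 1)
      = pvCal (4 - i) + 1 := by
  by_cases h : i < 4
  · have : i = 0 ∨ i = 1 ∨ i = 2 ∨ i = 3 := by omega
    rcases this with h0 | h0 | h0 | h0 <;> subst h0 <;> decide
  · have h1 : (4 : Int) - i + 1 ≤ 1 := by omega
    rw [if_neg h, pvCal, PySem.List.pyRange_one_eq_nil h1]
    simp

lemma pv_vowel_d_cases (c : Char)
    (hc : c = 'A' ∨ c = 'E' ∨ c = 'I' ∨ c = 'O' ∨ c = 'U') :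
    pvDicA.getD c 0 = pvDicB.getD c 0 ∧ 0 ≤ pvDicA.getD c 0 := by
  rcases hc with h | h | h | h | h <;> subst h <;> decide

lemma pv_fold_eq (l : List Char) (s a : Int) (hs : 0 ≤ s)
    (hl : ∀ c ∈ l, c = 'A' ∨ c = 'E' ∨ c = 'I' ∨ c = 'O' ∨ c = 'U') :
    (PySem.List.enumerate l s).foldl
      (fun answer p =>
        let d := pvDicA.getD p.2 0
        let answer := (PySem.List.pyRange 0 d 1).foldl (fun a _ => a + pvCal (4 - p.1)) answer
        answer + d + 1) a
    = (PySem.List.enumerate l s).foldl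
      (fun answer p =>
        let weight : Int :=
          if p.1 < 4 then PySem.Int.floordiv ((5 : Int) ^ (5 - p.1).toNat - 5) 4 + 1 else 1
        answer + pvDicB.getD p.2 0 * weight + 1) a := by
  induction l generalizing s a with
  | nil => simp [PySem.List.enumerate_nil]
  | cons c cs ih =>
    rw [PySem.List.enumerate_cons]
    simp only [List.foldl_cons]
    obtain ⟨hd, hd0⟩ := pv_vowel_d_cases c (hl c (by simp))
    have hstep :
        ((PySem.List.pyRange 0 (pvDicA.getD c 0) 1).foldl
            (fun a _ => a + pvCal (4 - s)) a) + pvDicA.getD c 0 + 1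
        = a + pvDicB.getD c 0 *
            (if s < 4 then PySem.Int.floordiv ((5 : Int) ^ (5 - s).toNat - 5) 4 + 1 else 1) + 1 := by
      rw [pv_weight_eq s hs, pv_foldl_add_const, PySem.List.length_pyRange_one, ← hd]
      have : ((pvDicA.getD c 0 - 0).toNat : Int) = pvDicA.getD c 0 := by omega
      rw [this]; ring
    rw [hstep.symm] at *
    rw [ih (s + 1) _ (by omega) (fun c hc => hl c (by simp [hc]))]

-- ===== VERDICT (by name: the statement is the Claim_ definition above) =====
theorem solution_spec : Claim_equal_solution := by
  intro word _ hpre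
  unfold Spec_solution solution solution_alt
  refine pv_fold_eq word.toList 0 0 (by omega) ?_
  intro c hc
  have h := List.all_eq_true.mp hpre c hc
  simp only [Bool.or_eq_true, decide_eq_true_eq] at h
  tauto
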